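-- pv_equiv track=rewrite | github.com/breno-cn/aoc-2024 | day2/solution.py | report_breaks_order
-- ===== SOURCE A (Python) =====
-- from typing import List, Set
--
-- def report_breaks_order(report: List[int]) -> Set[int]:
--     is_crescent = report[0] < report[1]
--     index = set()
--
--     for i in range(len(report) - 1):
--         if is_crescent:
--             if report[i] > report[i + 1]:
--                 if i > 0:
--                     index.add(i - 1)
--                 index.add(i)
--                 index.add(i + 1)
--         else:
--             if report[i] < report[i + 1]:
--                 if i > 0:
--                     index.add(i - 1)
--                 index.add(i)
--                 index.add(i + 1)
--
--     return index
-- ===== SOURCE B (Python) =====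
-- from typing import List, Set
--
-- def report_breaks_order(report: List[int]) -> Set[int]:
--     is_crescent = report[0] < report[1]
--     n = len(report)
--     breaks = {i for i in range(n - 1)
--               if (report[i] > report[i + 1] if is_crescent else report[i] < report[i + 1])}
--     return {j for j in range(n)
--             if j - 1 in breaks or j in breaks or j + 1 in breaks}
-- ===== Notes on version B (the rewrite author's own statement) =====
-- stated objective: alternative
-- what changed: A interleaves detection and marking in one loop that mutates the result set with i-1/i/i+1 inserts; B first builds a break-position set in one pass, then marks each index j by membership of j-1/j/j+1 in that set, separating detection from neighborhood marking.
-- outside the precondition, e.g. on report_breaks_order([0]): A raises IndexError, B raises IndexError; on report_breaks_order([1]): A raises IndexError, B raises IndexError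
import Mathlib
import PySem

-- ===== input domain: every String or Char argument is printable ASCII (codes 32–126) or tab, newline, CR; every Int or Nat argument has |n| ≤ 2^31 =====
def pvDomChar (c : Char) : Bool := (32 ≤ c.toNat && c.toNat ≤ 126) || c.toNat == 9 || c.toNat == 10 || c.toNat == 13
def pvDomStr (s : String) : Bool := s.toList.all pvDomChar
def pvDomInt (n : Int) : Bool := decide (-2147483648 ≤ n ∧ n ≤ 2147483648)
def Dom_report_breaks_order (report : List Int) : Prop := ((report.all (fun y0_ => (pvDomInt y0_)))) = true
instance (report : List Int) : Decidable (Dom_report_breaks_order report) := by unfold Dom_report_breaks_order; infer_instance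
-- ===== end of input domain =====

-- B separates break detection (one pass building a break-position set) from marking (index j is in
-- the answer iff one of j-1, j, j+1 is a break position), instead of A's single loop that mutates
-- the result set with i-1/i/i+1 inserts; same asymptotic cost, different decomposition.

-- ===== PORT A =====
def report_breaks_order (report : List Int) : List Int :=
  let isC := PySem.List.pyGetD report 0 0 < PySem.List.pyGetD report 1 0
  (PySem.List.pyRange 0 ((report.length : Int) - 1) 1).foldl (fun index i =>
    if isC then
      if PySem.List.pyGetD report i 0 > PySem.List.pyGetD report (i + 1) 0 then
        PySem.Set.add (PySem.Set.add
          (if i > 0 then PySem.Set.add index (i - 1) else index) i) (i + 1)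
      else index
    else
      if PySem.List.pyGetD report i 0 < PySem.List.pyGetD report (i + 1) 0 then
        PySem.Set.add (PySem.Set.add
          (if i > 0 then PySem.Set.add index (i - 1) else index) i) (i + 1)
      else index) PySem.Set.empty

-- ===== PORT B =====
def report_breaks_order_alt (report : List Int) : List Int :=
  let isC := PySem.List.pyGetD report 0 0 < PySem.List.pyGetD report 1 0
  let n : Int := report.length
  let breaks : PySem.Set Int := PySem.Set.ofList ((PySem.List.pyRange 0 (n - 1) 1).filter (fun i =>
    if isC then decide (PySem.List.pyGetD report i 0 > PySem.List.pyGetD report (i + 1) 0)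
    else decide (PySem.List.pyGetD report i 0 < PySem.List.pyGetD report (i + 1) 0)))
  PySem.Set.ofList ((PySem.List.pyRange 0 n 1).filter (fun j =>
    PySem.Set.contains breaks (j - 1) || PySem.Set.contains breaks j || PySem.Set.contains breaks (j + 1)))

-- ===== PRECONDITION & SPEC =====
-- Python A evaluates report[0] and report[1] first: with fewer than 2 elements it raises IndexError.
def Pre_report_breaks_order (report : List Int) : Prop := 2 ≤ report.length
instance (report : List Int) : Decidable (Pre_report_breaks_order report) := by
  unfold Pre_report_breaks_order; infer_instance
def pvWitness_report_breaks_order : List Int := [1, 5, 2]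

def Spec_report_breaks_order (report : List Int) (out : List Int) : Prop := out = report_breaks_order_alt report
instance (report : List Int) (out : List Int) : Decidable (Spec_report_breaks_order report out) := by unfold Spec_report_breaks_order; infer_instance

-- ===== CLAIM (what is proved, stated in full; the proofs are below) =====
def Claim_equal_report_breaks_order : Prop := ∀ (report : List Int), Dom_report_breaks_order report → Pre_report_breaks_order report → Spec_report_breaks_order report (report_breaks_order report)

-- ===== LEMMAS AND PROOFS =====


def brkP (report : List Int) (i : Int) : Bool :=
  decide (0 ≤ i) && decide (i < (report.length : Int) - 1) &&
  (if PySem.List.pyGetD report 0 0 < PySem.List.pyGetD report 1 0 then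
      decide (PySem.List.pyGetD report i 0 > PySem.List.pyGetD report (i + 1) 0)
    else decide (PySem.List.pyGetD report i 0 < PySem.List.pyGetD report (i + 1) 0))

def nearP (report : List Int) (k j : Int) : Bool :=
  (brkP report (j - 1) && decide (j - 1 < k)) ||
  (brkP report j && decide (j < k)) ||
  (brkP report (j + 1) && decide (j + 1 < k))

lemma brkP_bounds {report : List Int} {i : Int} (h : brkP report i = true) :
    0 ≤ i ∧ i < (report.length : Int) - 1 := by
  unfold brkP at h
  simp only [Bool.and_eq_true, decide_eq_true_eq] at h
  exact ⟨h.1.1, h.1.2⟩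

lemma nearP_le {report : List Int} {k j : Int} (h : nearP report k j = true) : j ≤ k := by
  unfold nearP at h
  simp only [Bool.or_eq_true, Bool.and_eq_true, decide_eq_true_eq] at h
  rcases h with (⟨hb, hlt⟩ | ⟨hb, hlt⟩) | ⟨hb, hlt⟩ <;> omega

lemma nearP_zero (report : List Int) (j : Int) : nearP report 0 j = false := by
  unfold nearP
  simp only [Bool.or_eq_false_iff, Bool.and_eq_false_iff]
  refine ⟨⟨?_, ?_⟩, ?_⟩
  · by_cases hb : brkP report (j - 1) = true
    · exact Or.inr (by have := brkP_bounds hb; simp; omega)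
    · exact Or.inl (by simpa using hb)
  · by_cases hb : brkP report j = true
    · exact Or.inr (by have := brkP_bounds hb; simp; omega)
    · exact Or.inl (by simpa using hb)
  · by_cases hb : brkP report (j + 1) = true
    · exact Or.inr (by have := brkP_bounds hb; simp; omega)
    · exact Or.inl (by simpa using hb)

lemma nearP_mono {report : List Int} {k k' j : Int} (hk : k ≤ k')
    (h : nearP report k j = true) : nearP report k' j = true := by
  unfold nearP at h ⊢
  simp only [Bool.or_eq_true, Bool.and_eq_true, decide_eq_true_eq] at h ⊢
  rcases h with (⟨hb, hlt⟩ | ⟨hb, hlt⟩) | ⟨hb, hlt⟩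
  · exact Or.inl (Or.inl ⟨hb, by omega⟩)
  · exact Or.inl (Or.inr ⟨hb, by omega⟩)
  · exact Or.inr ⟨hb, by omega⟩

lemma nearP_succ_not {report : List Int} {k : Int} (hb : brkP report k = false) (j : Int) :
    nearP report (k + 1) j = nearP report k j := by
  unfold nearP
  apply Bool.eq_iff_iff.2
  simp only [Bool.or_eq_true, Bool.and_eq_true, decide_eq_true_eq]
  constructor
  · rintro ((⟨h, hlt⟩ | ⟨h, hlt⟩) | ⟨h, hlt⟩)
    · refine Or.inl (Or.inl ⟨h, ?_⟩); rcases eq_or_ne (j - 1) k with he | he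
      · rw [he] at h; rw [h] at hb; cases hb
      · omega
    · refine Or.inl (Or.inr ⟨h, ?_⟩); rcases eq_or_ne j k with he | he
      · rw [he] at h; rw [h] at hb; cases hb
      · omega
    · refine Or.inr ⟨h, ?_⟩; rcases eq_or_ne (j + 1) k with he | he
      · rw [he] at h; rw [h] at hb; cases hb
      · omega
  · rintro ((⟨h, hlt⟩ | ⟨h, hlt⟩) | ⟨h, hlt⟩)
    · exact Or.inl (Or.inl ⟨h, by omega⟩)
    · exact Or.inl (Or.inr ⟨h, by omega⟩)
    · exact Or.inr ⟨h, by omega⟩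

lemma nearP_succ_brk {report : List Int} {k : Int} (hb : brkP report k = true) (j : Int) :
    nearP report (k + 1) j =
      (nearP report k j || decide (j = k - 1) || decide (j = k) || decide (j = k + 1)) := by
  unfold nearP
  apply Bool.eq_iff_iff.2
  simp only [Bool.or_eq_true, Bool.and_eq_true, decide_eq_true_eq]
  constructor
  · rintro ((⟨h, hlt⟩ | ⟨h, hlt⟩) | ⟨h, hlt⟩)
    · rcases eq_or_ne (j - 1) k with he | he
      · exact Or.inr (by omega)
      · exact Or.inl (Or.inl (Or.inl (Or.inl (Or.inl ⟨h, by omega⟩))))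
    · rcases eq_or_ne j k with he | he
      · exact Or.inl (Or.inr he)
      · exact Or.inl (Or.inl (Or.inl (Or.inl (Or.inr ⟨h, by omega⟩))))
    · rcases eq_or_ne (j + 1) k with he | he
      · exact Or.inl (Or.inl (Or.inr (by omega)))
      · exact Or.inl (Or.inl (Or.inl (Or.inr ⟨h, by omega⟩)))
  · rintro (((h | he) | he) | he)
    · rcases h with ((⟨h, hlt⟩ | ⟨h, hlt⟩) | ⟨h, hlt⟩)
      · exact Or.inl (Or.inl ⟨h, by omega⟩)
      · exact Or.inl (Or.inr ⟨h, by omega⟩)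
      · exact Or.inr ⟨h, by omega⟩
    · refine Or.inr ⟨?_, by omega⟩; rwa [show j + 1 = k by omega]
    · refine Or.inl (Or.inr ⟨?_, by omega⟩); rwa [he]
    · refine Or.inl (Or.inl ⟨?_, by omega⟩); rwa [show j - 1 = k by omega]

lemma nearP_at_kp1 (report : List Int) (k : Int) : nearP report k (k + 1) = false := by
  unfold nearP
  simp only [Bool.or_eq_false_iff, Bool.and_eq_false_iff]
  refine ⟨⟨Or.inr ?_, Or.inr ?_⟩, Or.inr ?_⟩ <;> (simp only [decide_eq_false_iff_not]; omega)

lemma nearP_at_k (report : List Int) (k : Int) : nearP report k k = brkP report (k - 1) := by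
  unfold nearP
  have h1 : decide (k - 1 < k) = true := by simp only [decide_eq_true_eq]; omega
  have h2 : decide (k < k) = false := by simp only [decide_eq_false_iff_not]; omega
  have h3 : decide (k + 1 < k) = false := by simp only [decide_eq_false_iff_not]; omega
  rw [h1, h2, h3]
  simp

lemma nearP_at_km1 (report : List Int) (k : Int) :
    nearP report k (k - 1) = (brkP report (k - 2) || brkP report (k - 1)) := by
  unfold nearP
  have e1 : k - 1 - 1 = k - 2 := by omega
  have e2 : k - 1 + 1 = k := by omega
  rw [e1, e2]
  have h1 : decide (k - 2 < k) = true := by simp only [decide_eq_true_eq]; omega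
  have h2 : decide (k - 1 < k) = true := by simp only [decide_eq_true_eq]; omega
  have h3 : decide (k < k) = false := by simp only [decide_eq_false_iff_not]; omega
  rw [h1, h2, h3]
  simp

def stepA (report : List Int) (index : List Int) (i : Int) : List Int :=
  if PySem.List.pyGetD report 0 0 < PySem.List.pyGetD report 1 0 then
    if PySem.List.pyGetD report i 0 > PySem.List.pyGetD report (i + 1) 0 then
      PySem.Set.add (PySem.Set.add
        (if i > 0 then PySem.Set.add index (i - 1) else index) i) (i + 1)
    else index
  else
    if PySem.List.pyGetD report i 0 < PySem.List.pyGetD report (i + 1) 0 then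
      PySem.Set.add (PySem.Set.add
        (if i > 0 then PySem.Set.add index (i - 1) else index) i) (i + 1)
    else index

lemma contains_filter (p : Int → Bool) (l : List Int) (x : Int) :
    PySem.Set.contains (l.filter p) x = (p x && decide (x ∈ l)) := by
  apply Bool.eq_iff_iff.2
  simp [PySem.Set.contains, List.mem_filter, and_comm]

lemma contains_append (s t : List Int) (x : Int) :
    PySem.Set.contains (s ++ t) x = (PySem.Set.contains s x || PySem.Set.contains t x) := by
  simp [PySem.Set.contains]

lemma add_eq (s : List Int) (x : Int) :
    PySem.Set.add s x = if PySem.Set.contains s x then s else s ++ [x] := rfl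

lemma contains_S (report : List Int) (k x : Int) :
    PySem.Set.contains ((PySem.List.pyRange 0 (report.length : Int) 1).filter (nearP report k)) x
    = (nearP report k x && decide (0 ≤ x ∧ x < (report.length : Int))) := by
  rw [contains_filter]
  congr 1
  apply decide_eq_decide.2
  exact PySem.List.mem_pyRange_one

lemma bool_aux (a b c d : Bool) : ((a || b || c || d) && !a) = ((b || c || d) && !a) := by
  cases a <;> cases b <;> cases c <;> cases d <;> rfl

lemma filter_split (p q : Int → Bool) (l : List Int) (hl : l.Pairwise (· < ·))
    (hpq : ∀ j ∈ l, p j = true → q j = true)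
    (hsep : ∀ j1 ∈ l, ∀ j2 ∈ l, p j1 = true → q j2 = true → p j2 = false → j1 < j2) :
    l.filter q = l.filter p ++ l.filter (fun j => q j && !p j) := by
  induction l with
  | nil => rfl
  | cons a t ih =>
    rw [List.pairwise_cons] at hl
    by_cases hq : q a = true
    · by_cases hp : p a = true
      · simp only [List.filter_cons, hq, hp, Bool.not_true, Bool.and_false, if_true]
        rw [List.cons_append]
        congr 1
        exact ih hl.2 (fun j hj => hpq j (List.mem_cons_of_mem _ hj))
          (fun j1 h1 j2 h2 => hsep j1 (List.mem_cons_of_mem _ h1) j2 (List.mem_cons_of_mem _ h2))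
      · have hnone : ∀ j ∈ a :: t, p j = false := by
          intro j hj
          by_contra hpj
          have hpj : p j = true := by simpa using hpj
          have := hsep j hj a (List.mem_cons_self) hpj hq (by simpa using hp)
          rcases List.mem_cons.1 hj with rfl | hjt
          · omega
          · exact absurd this (by have := hl.1 j hjt; omega)
        have hfp : (a :: t).filter p = [] := by
          apply List.filter_eq_nil_iff.2
          intro j hj; simp [hnone j hj]
        rw [hfp, List.nil_append]
        apply List.filter_congr
        intro j hj; simp [hnone j hj]
    · have hp : p a = false := by
        by_contra h; exact hq (hpq a List.mem_cons_self (by simpa using h))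
      simp only [List.filter_cons, hq, hp, Bool.false_and]
      exact ih hl.2 (fun j hj => hpq j (List.mem_cons_of_mem _ hj))
        (fun j1 h1 j2 h2 => hsep j1 (List.mem_cons_of_mem _ h1) j2 (List.mem_cons_of_mem _ h2))

lemma add_mem (s : List Int) (x : Int) (h : PySem.Set.contains s x = true) :
    PySem.Set.add s x = s := by rw [add_eq, h]; simp

lemma add_new (s : List Int) (x : Int) (h : PySem.Set.contains s x = false) :
    PySem.Set.add s x = s ++ [x] := by rw [add_eq, h]; simp

lemma addthree (report : List Int) (k : Int) (hk0 : 0 ≤ k)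
    (hk : k < (report.length : Int) - 1) (hb : brkP report k = true) :
    PySem.Set.add (PySem.Set.add
        (if k > 0 then
          PySem.Set.add ((PySem.List.pyRange 0 (report.length : Int) 1).filter (nearP report k)) (k - 1)
        else (PySem.List.pyRange 0 (report.length : Int) 1).filter (nearP report k)) k) (k + 1)
    = (PySem.List.pyRange 0 (report.length : Int) 1).filter (nearP report (k + 1)) := by
  have hsplit :
      (PySem.List.pyRange 0 (report.length : Int) 1).filter (nearP report (k + 1)) =
      (PySem.List.pyRange 0 (report.length : Int) 1).filter (nearP report k) ++
      (PySem.List.pyRange 0 (report.length : Int) 1).filter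
        (fun j => nearP report (k + 1) j && !nearP report k j) := by
    apply filter_split _ _ _ (PySem.List.pairwise_lt_pyRange_one 0 _)
    · exact fun j _ h => nearP_mono (by omega) h
    · intro j1 _ j2 _ hp1 hq2 hp2
      have hle := nearP_le hp1
      rw [nearP_succ_brk hb] at hq2
      simp only [Bool.or_eq_true, decide_eq_true_eq] at hq2
      rcases hq2 with (((hn | he) | he) | he)
      · rw [hn] at hp2; cases hp2
      · have hB : brkP report (k - 1) = false := by
          have h2 := hp2
          rw [he, nearP_at_km1] at h2
          exact (Bool.or_eq_false_iff.1 h2).2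
        have h1k : j1 ≠ k := by
          intro h; rw [h, nearP_at_k] at hp1; simp [hp1] at hB
        have h1km : j1 ≠ j2 := by
          intro h; rw [h] at hp1; simp [hp1] at hp2
        omega
      · have h1k : j1 ≠ j2 := by intro h; rw [h] at hp1; simp [hp1] at hp2
        omega
      · omega
  rw [hsplit]
  by_cases hkz : k = 0
  · subst hkz
    have hn2 : (2 : Int) ≤ (report.length : Int) := by omega
    have htail : (PySem.List.pyRange 0 (report.length : Int) 1).filter
        (fun j => nearP report (0 + 1) j && !nearP report 0 j) = [0, 1] := by
      have hc : ∀ j ∈ PySem.List.pyRange 0 (report.length : Int) 1,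
          (nearP report (0 + 1) j && !nearP report 0 j)
          = (decide (j = 0 - 1) || decide (j = 0) || decide (j = 0 + 1)) := by
        intro j _
        rw [nearP_succ_brk hb j, bool_aux, nearP_zero, Bool.not_false, Bool.and_true]
      rw [List.filter_congr hc]
      rw [PySem.List.pyRange_one_append 0 2 (report.length : Int) (by omega) hn2]
      rw [List.filter_append]
      have h1 : PySem.List.pyRange 0 2 1 = [0, 1] := by decide
      have h2 : (PySem.List.pyRange 2 (report.length : Int) 1).filter
          (fun j => decide (j = 0 - 1) || decide (j = 0) || decide (j = 0 + 1)) = [] := by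
        apply List.filter_eq_nil_iff.2
        intro j hj
        have := PySem.List.mem_pyRange_one.1 hj
        simp only [Bool.or_eq_true, decide_eq_true_eq]
        omega
      rw [h1, h2, List.append_nil]
      decide
    rw [htail, if_neg (by omega)]
    have c1 : PySem.Set.contains
        ((PySem.List.pyRange 0 (report.length : Int) 1).filter (nearP report 0)) 0 = false := by
      rw [contains_S, nearP_zero]; rfl
    rw [add_new _ _ c1]
    have c2 : PySem.Set.contains
        ((PySem.List.pyRange 0 (report.length : Int) 1).filter (nearP report 0) ++ [(0 : Int)])
        (0 + 1) = false := by
      rw [contains_append, contains_S, nearP_zero]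
      simp [PySem.Set.contains]
    rw [add_new _ _ c2, List.append_assoc]
    rfl
  · -- k > 0
    have hm1 : decide (0 ≤ k - 1 ∧ k - 1 < (report.length : Int)) = true := by
      simp only [decide_eq_true_eq]; omega
    have hmk : decide (0 ≤ k ∧ k < (report.length : Int)) = true := by
      simp only [decide_eq_true_eq]; omega
    have htail : (PySem.List.pyRange 0 (report.length : Int) 1).filter
        (fun j => nearP report (k + 1) j && !nearP report k j) =
        ((if nearP report k (k - 1) = false then [k - 1] else []) ++
         (if nearP report k k = false then [k] else []) ++ [k + 1]) := by
      have hc : ∀ j ∈ PySem.List.pyRange 0 (report.length : Int) 1,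
          (nearP report (k + 1) j && !nearP report k j)
          = ((decide (j = k - 1) || decide (j = k) || decide (j = k + 1)) && !nearP report k j) := by
        intro j _
        rw [nearP_succ_brk hb j, bool_aux]
      rw [List.filter_congr hc]
      rw [PySem.List.pyRange_one_append 0 (k - 1) (report.length : Int) (by omega) (by omega)]
      rw [PySem.List.pyRange_one_append (k - 1) (k + 2) (report.length : Int) (by omega) (by omega)]
      rw [List.filter_append, List.filter_append]
      have h0 : (PySem.List.pyRange 0 (k - 1) 1).filter
          (fun j => (decide (j = k - 1) || decide (j = k) || decide (j = k + 1)) && !nearP report k j) = [] := by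
        apply List.filter_eq_nil_iff.2
        intro j hj
        have := PySem.List.mem_pyRange_one.1 hj
        have he : (decide (j = k - 1) || decide (j = k) || decide (j = k + 1)) = false := by
          simp only [Bool.or_eq_false_iff, decide_eq_false_iff_not]; omega
        simp [he]
      have h2 : (PySem.List.pyRange (k + 2) (report.length : Int) 1).filter
          (fun j => (decide (j = k - 1) || decide (j = k) || decide (j = k + 1)) && !nearP report k j) = [] := by
        apply List.filter_eq_nil_iff.2
        intro j hj
        have := PySem.List.mem_pyRange_one.1 hj
        have he : (decide (j = k - 1) || decide (j = k) || decide (j = k + 1)) = false := by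
          simp only [Bool.or_eq_false_iff, decide_eq_false_iff_not]; omega
        simp [he]
      have hmid : PySem.List.pyRange (k - 1) (k + 2) 1 = [k - 1, k, k + 1] := by
        rw [PySem.List.pyRange_one_cons (by omega), show k - 1 + 1 = k by omega]
        rw [PySem.List.pyRange_one_cons (by omega), show k + 2 = k + 1 + 1 by ring,
          PySem.List.pyRange_one_singleton]
      rw [h0, h2, hmid, List.nil_append, List.append_nil]
      have d1 : (decide (k - 1 = k - 1) || decide (k - 1 = k) || decide (k - 1 = k + 1)) = true := by
        simp
      have d2 : (decide (k = k - 1) || decide (k = k) || decide (k = k + 1)) = true := by simp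
      have d3 : (decide (k + 1 = k - 1) || decide (k + 1 = k) || decide (k + 1 = k + 1)) = true := by
        simp
      rw [List.filter_cons, List.filter_cons, List.filter_cons, List.filter_nil, d1, d2, d3]
      simp only [Bool.true_and, nearP_at_kp1, Bool.not_false, if_true]
      cases h1 : nearP report k (k - 1) <;> cases h2 : nearP report k k <;> simp
    rw [htail, if_pos (by omega)]
    by_cases b2 : nearP report k k = true
    · have b1 : nearP report k (k - 1) = true := by
        rw [nearP_at_k] at b2
        rw [nearP_at_km1, b2, Bool.or_true]
      have c1 : PySem.Set.contains
          ((PySem.List.pyRange 0 (report.length : Int) 1).filter (nearP report k)) (k - 1) = true := by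
        rw [contains_S, b1, hm1]; rfl
      have c2 : PySem.Set.contains
          ((PySem.List.pyRange 0 (report.length : Int) 1).filter (nearP report k)) k = true := by
        rw [contains_S, b2, hmk]; rfl
      have c3 : PySem.Set.contains
          ((PySem.List.pyRange 0 (report.length : Int) 1).filter (nearP report k)) (k + 1) = false := by
        rw [contains_S, nearP_at_kp1]; rfl
      rw [add_mem _ _ c1, add_mem _ _ c2, add_new _ _ c3, b1, b2]
      simp
    · have b2f : nearP report k k = false := by simpa using b2
      by_cases b1 : nearP report k (k - 1) = true
      · have c1 : PySem.Set.contains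
            ((PySem.List.pyRange 0 (report.length : Int) 1).filter (nearP report k)) (k - 1) = true := by
          rw [contains_S, b1, hm1]; rfl
        have c2 : PySem.Set.contains
            ((PySem.List.pyRange 0 (report.length : Int) 1).filter (nearP report k)) k = false := by
          rw [contains_S, b2f]; rfl
        rw [add_mem _ _ c1, add_new _ _ c2]
        have c3 : PySem.Set.contains
            ((PySem.List.pyRange 0 (report.length : Int) 1).filter (nearP report k) ++ [k])
            (k + 1) = false := by
          rw [contains_append, contains_S, nearP_at_kp1]
          simp [PySem.Set.contains]
        rw [add_new _ _ c3, b1, b2f]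
        simp
      · have b1f : nearP report k (k - 1) = false := by simpa using b1
        have c1 : PySem.Set.contains
            ((PySem.List.pyRange 0 (report.length : Int) 1).filter (nearP report k)) (k - 1) = false := by
          rw [contains_S, b1f]; rfl
        rw [add_new _ _ c1]
        have c2 : PySem.Set.contains
            ((PySem.List.pyRange 0 (report.length : Int) 1).filter (nearP report k) ++ [k - 1])
            k = false := by
          rw [contains_append, contains_S, b2f]
          simp [PySem.Set.contains]
          omega
        rw [add_new _ _ c2]
        have c3 : PySem.Set.contains
            ((PySem.List.pyRange 0 (report.length : Int) 1).filter (nearP report k) ++ [k - 1] ++ [k])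
            (k + 1) = false := by
          rw [contains_append, contains_append, contains_S, nearP_at_kp1]
          simp [PySem.Set.contains]
          omega
        rw [add_new _ _ c3, b1f, b2f]
        simp

lemma stepA_filter (report : List Int) (k : Int) (hk0 : 0 ≤ k)
    (hk : k < (report.length : Int) - 1) :
    stepA report ((PySem.List.pyRange 0 (report.length : Int) 1).filter (nearP report k)) k
    = (PySem.List.pyRange 0 (report.length : Int) 1).filter (nearP report (k + 1)) := by
  by_cases hb : brkP report k = true
  · unfold stepA
    by_cases hc : PySem.List.pyGetD report 0 0 < PySem.List.pyGetD report 1 0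
    · rw [if_pos hc]
      have hcmp : PySem.List.pyGetD report k 0 > PySem.List.pyGetD report (k + 1) 0 := by
        unfold brkP at hb
        rw [if_pos hc] at hb
        simp only [Bool.and_eq_true, decide_eq_true_eq] at hb
        exact hb.2
      rw [if_pos hcmp]
      exact addthree report k hk0 hk hb
    · rw [if_neg hc]
      have hcmp : PySem.List.pyGetD report k 0 < PySem.List.pyGetD report (k + 1) 0 := by
        unfold brkP at hb
        rw [if_neg hc] at hb
        simp only [Bool.and_eq_true, decide_eq_true_eq] at hb
        exact hb.2
      rw [if_pos hcmp]
      exact addthree report k hk0 hk hb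
  · have hbf : brkP report k = false := by simpa using hb
    unfold stepA
    by_cases hc : PySem.List.pyGetD report 0 0 < PySem.List.pyGetD report 1 0
    · rw [if_pos hc]
      have hgt : ¬ PySem.List.pyGetD report k 0 > PySem.List.pyGetD report (k + 1) 0 := by
        intro hgt
        have ht : brkP report k = true := by
          unfold brkP; rw [if_pos hc]; simp [hk0, hk, hgt]
        rw [ht] at hbf; cases hbf
      rw [if_neg hgt]
      exact (List.filter_congr (fun j _ => nearP_succ_not hbf j)).symm
    · rw [if_neg hc]
      have hgt : ¬ PySem.List.pyGetD report k 0 < PySem.List.pyGetD report (k + 1) 0 := by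
        intro hgt
        have ht : brkP report k = true := by
          unfold brkP; rw [if_neg hc]; simp [hk0, hk, hgt]
        rw [ht] at hbf; cases hbf
      rw [if_neg hgt]
      exact (List.filter_congr (fun j _ => nearP_succ_not hbf j)).symm

lemma A_inv (report : List Int) (m : Nat) (hm : (m : Int) ≤ (report.length : Int) - 1) :
    (PySem.List.pyRange 0 (m : Int) 1).foldl (stepA report) PySem.Set.empty
    = (PySem.List.pyRange 0 (report.length : Int) 1).filter (nearP report (m : Int)) := by
  induction m with
  | zero =>
    rw [Nat.cast_zero, PySem.List.pyRange_one_eq_nil (by omega)]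
    rw [List.foldl_nil]
    symm
    apply List.filter_eq_nil_iff.2
    intro j _
    simp [nearP_zero]
  | succ m ih =>
    have hc : ((m + 1 : Nat) : Int) = (m : Int) + 1 := by push_cast; ring
    rw [hc] at hm ⊢
    rw [PySem.List.pyRange_one_succ_right (by positivity), List.foldl_append,
      List.foldl_cons, List.foldl_nil]
    rw [ih (by omega)]
    exact stepA_filter report (m : Int) (by positivity) (by omega)

lemma report_breaks_order_eq_foldl (report : List Int) :
    report_breaks_order report =
    (PySem.List.pyRange 0 ((report.length : Int) - 1) 1).foldl (stepA report) PySem.Set.empty := rfl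

lemma alt_eq (report : List Int) :
    report_breaks_order_alt report =
    PySem.Set.ofList ((PySem.List.pyRange 0 (report.length : Int) 1).filter (fun j =>
      PySem.Set.contains (PySem.Set.ofList
          ((PySem.List.pyRange 0 ((report.length : Int) - 1) 1).filter (fun i =>
            if PySem.List.pyGetD report 0 0 < PySem.List.pyGetD report 1 0 then
              decide (PySem.List.pyGetD report i 0 > PySem.List.pyGetD report (i + 1) 0)
            else decide (PySem.List.pyGetD report i 0 < PySem.List.pyGetD report (i + 1) 0)))) (j - 1) ||
      PySem.Set.contains (PySem.Set.ofList
          ((PySem.List.pyRange 0 ((report.length : Int) - 1) 1).filter (fun i =>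
            if PySem.List.pyGetD report 0 0 < PySem.List.pyGetD report 1 0 then
              decide (PySem.List.pyGetD report i 0 > PySem.List.pyGetD report (i + 1) 0)
            else decide (PySem.List.pyGetD report i 0 < PySem.List.pyGetD report (i + 1) 0)))) j ||
      PySem.Set.contains (PySem.Set.ofList
          ((PySem.List.pyRange 0 ((report.length : Int) - 1) 1).filter (fun i =>
            if PySem.List.pyGetD report 0 0 < PySem.List.pyGetD report 1 0 then
              decide (PySem.List.pyGetD report i 0 > PySem.List.pyGetD report (i + 1) 0)
            else decide (PySem.List.pyGetD report i 0 < PySem.List.pyGetD report (i + 1) 0)))) (j + 1))) := rfl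

lemma contains_breaks (report : List Int) (x : Int) :
    PySem.Set.contains ((PySem.List.pyRange 0 ((report.length : Int) - 1) 1).filter (fun i =>
      if PySem.List.pyGetD report 0 0 < PySem.List.pyGetD report 1 0 then
        decide (PySem.List.pyGetD report i 0 > PySem.List.pyGetD report (i + 1) 0)
      else decide (PySem.List.pyGetD report i 0 < PySem.List.pyGetD report (i + 1) 0))) x
    = brkP report x := by
  rw [contains_filter]
  unfold brkP
  apply Bool.eq_iff_iff.2
  simp only [Bool.and_eq_true, decide_eq_true_eq, PySem.List.mem_pyRange_one]
  tauto

lemma brkP_drop_bound (report : List Int) (i : Int) :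
    (brkP report i && decide (i < (report.length : Int) - 1)) = brkP report i := by
  cases h : brkP report i
  · simp
  · simp [(brkP_bounds h).2]

-- ===== VERDICT (by name: the statement is the Claim_ definition above) =====
theorem report_breaks_order_spec : Claim_equal_report_breaks_order := by
  intro report _ hpre
  unfold Spec_report_breaks_order
  have hlen : 2 ≤ report.length := hpre
  have hcast : ((report.length - 1 : Nat) : Int) = (report.length : Int) - 1 := by omega
  rw [report_breaks_order_eq_foldl, ← hcast,
    A_inv report (report.length - 1) (by omega), hcast]
  rw [alt_eq]
  rw [PySem.Set.ofList_eq_self_of_nodup _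
    ((PySem.List.nodup_pyRange_one 0 ((report.length : Int) - 1)).filter _)]
  simp only [contains_breaks]
  rw [PySem.Set.ofList_eq_self_of_nodup _
    ((PySem.List.nodup_pyRange_one 0 (report.length : Int)).filter _)]
  apply List.filter_congr
  intro j _
  unfold nearP
  rw [brkP_drop_bound, brkP_drop_bound, brkP_drop_bound]
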